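-- pv_equiv track=rewrite | github.com/josecastro04/LAII | Introdução ao Python/hacker.py | hacker
-- ===== SOURCE A (Python) =====
-- def checkCard(number, newNumber):
--     n = "";
--
--     for i, num in enumerate(number):
--         if (n == "*" and newNumber[i] != "*") or (n != "*" and newNumber[i] != "*"):
--             n += newNumber[i];
--         else:
--             n += num;
--
--     return n;
--
-- def contaN(number):
--     acc = 0;
--     for c in number:
--         if c != "*":
--             acc += 1;
--
--     return acc;
--
-- def hacker(log):
--     newLogs = {}
--
--     for c, email in log:
--         if email not in newLogs:
--             newLogs[email] = c;
--         else:
--             newLogs[email] = checkCard(newLogs[email], c);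
--
--
--     for email in newLogs:
--         newLogs[email] = (newLogs[email], contaN(newLogs[email]))
--
--     lista = list(newLogs.items())
--     lista.sort(key = lambda x : (-x[1][1], x[0]))
--
--     lista = [(conta, email) for email, (conta, acc) in lista]
--
--     return lista;
-- ===== SOURCE B (Python) =====
-- def merged_column(cards, i):
--     ch = '*'
--     for card in cards:
--         if card[i] != '*':
--             ch = card[i]
--     return ch
--
-- def hacker(log):
--     groups = {}
--     for card, email in log:
--         if email in groups:
--             groups[email].append(card)
--         else:
--             groups[email] = [card]
--
--     rows = []
--     for email, cards in groups.items():
--         chars = [merged_column(cards, i) for i in range(len(cards[0]))]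
--         number = ''.join(chars)
--         digits = sum(1 for ch in chars if ch != '*')
--         rows.append((number, digits, email))
--
--     rows.sort(key=lambda r: (-r[1], r[2]))
--     return [(number, email) for number, digits, email in rows]
-- ===== Notes on version B (the rewrite author's own statement) =====
-- stated objective: alternative
-- what changed: Replaces the incremental checkCard fold (re-merging the accumulated card with each new one) and the separate contaN pass by grouping each email's cards once and computing the merged number column by column (last non-'*' char wins), counting revealed digits while the columns are built.
import Mathlib
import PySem

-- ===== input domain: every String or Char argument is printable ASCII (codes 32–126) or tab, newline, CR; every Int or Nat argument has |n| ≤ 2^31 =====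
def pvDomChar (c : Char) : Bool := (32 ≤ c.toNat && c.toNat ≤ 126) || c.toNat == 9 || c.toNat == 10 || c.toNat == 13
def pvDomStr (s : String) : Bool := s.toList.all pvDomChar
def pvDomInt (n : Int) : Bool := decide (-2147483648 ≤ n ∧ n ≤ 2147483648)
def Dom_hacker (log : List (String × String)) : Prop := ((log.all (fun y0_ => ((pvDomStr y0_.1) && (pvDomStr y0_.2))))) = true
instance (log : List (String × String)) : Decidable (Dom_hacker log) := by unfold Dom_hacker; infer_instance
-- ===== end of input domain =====

-- B replaces A's incremental checkCard fold + separate contaN pass by a grouped, column-wise merge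
-- (last non-'*' char per column wins) with the revealed-digit count taken from the built columns.

-- ===== PORT A =====
def checkCardA (number newNumber : String) : String :=
  -- n = ""; for i, num in enumerate(number): ...  (newNumber[i] via pyGetD: in range on Pre_)
  String.ofList ((PySem.List.enumerate number.toList).foldl
    (fun n p =>
      if (n == ['*'] && (PySem.List.pyGetD newNumber.toList p.1 '*') != '*')
         || (n != ['*'] && (PySem.List.pyGetD newNumber.toList p.1 '*') != '*')
      then n ++ [PySem.List.pyGetD newNumber.toList p.1 '*'] else n ++ [p.2]) [])

def contaN (number : String) : Int :=
  number.toList.foldl (fun acc c => if c != '*' then acc + 1 else acc) 0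

def hacker (log : List (String × String)) : List (String × String) :=
  let newLogs : PySem.Dict String String :=
    log.foldl (fun d p =>
      if !(d.contains p.2) then d.insert p.2 p.1
      else d.insert p.2 (checkCardA ((d.get? p.2).getD "") p.1)) PySem.Dict.empty
  -- for email in newLogs: newLogs[email] = (newLogs[email], contaN(newLogs[email]))
  let newLogs2 : PySem.Dict String (String × Int) :=
    ⟨newLogs.items.map (fun q => (q.1, (q.2, contaN q.2)))⟩
  let lista := PySem.List.sorted2 newLogs2.items (fun x => -(x.2.2)) (fun x => x.1)
  lista.map (fun q => (q.2.1, q.1))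

-- ===== PORT B =====
def mergedColumn (cards : List String) (i : Int) : Char :=
  -- ch = '*'; for card in cards: if card[i] != '*': ch = card[i]   (card[i] via pyGetD: in range on Pre_)
  cards.foldl (fun ch card =>
    if (PySem.List.pyGetD card.toList i '*') != '*' then PySem.List.pyGetD card.toList i '*' else ch) '*'

def hacker_alt (log : List (String × String)) : List (String × String) :=
  let groups : PySem.Dict String (List String) :=
    log.foldl (fun d p =>
      if d.contains p.2 then d.insert p.2 (((d.get? p.2).getD []) ++ [p.1])
      else d.insert p.2 [p.1]) PySem.Dict.empty
  let rows : List (String × Int × String) :=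
    groups.items.map (fun q =>
      let chars := (PySem.List.pyRange 0 ((q.2.headD "").toList.length : Int)).map (fun i => mergedColumn q.2 i)
      (String.ofList chars, ((chars.countP (fun c => c != '*') : Nat) : Int), q.1))
  let rows2 := PySem.List.sorted2 rows (fun r => -(r.2.1)) (fun r => r.2.2)
  rows2.map (fun r => (r.1, r.2.2))

-- ===== PRECONDITION & SPEC =====
-- Pre_ excludes exactly the logs on which A raises IndexError: a card strictly shorter than the
-- first card logged for the same email (checkCard indexes the new card up to the first card's length).
def Pre_hacker (log : List (String × String)) : Prop :=
  ∀ p ∈ log, ∀ q ∈ log,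
    (log.filter (fun r => r.2 == p.2)).head? = some q → q.1.toList.length ≤ p.1.toList.length
instance (log : List (String × String)) : Decidable (Pre_hacker log) := by unfold Pre_hacker; infer_instance

def pvWitness_hacker : (List (String × String)) := [("12*4", "a@x"), ("*2*5", "a@x"), ("9**", "b@y")]

def Spec_hacker (log : List (String × String)) (out : List (String × String)) : Prop := out = hacker_alt log
instance (log : List (String × String)) (out : List (String × String)) : Decidable (Spec_hacker log out) := by unfold Spec_hacker; infer_instance

-- ===== CLAIM (what is proved, stated in full; the proofs are below) =====
def Claim_equal_hacker : Prop := ∀ (log : List (String × String)), Dom_hacker log → Pre_hacker log → Spec_hacker log (hacker log)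

-- ===== LEMMAS AND PROOFS =====

-- emails in first-occurrence order / the cards logged for one email, in log order
def emailsOf (l : List (String × String)) : List String := PySem.List.dedup (l.map Prod.snd)
def cardsOf (l : List (String × String)) (e : String) : List String :=
  (l.filter (fun r => r.2 == e)).map Prod.fst

-- A's merged value for one email = fold of checkCardA over its cards
def aMerge : List String → String
  | [] => ""
  | c :: t => t.foldl checkCardA c

-- generic "group by email" dict fold covering both ports' first loops
def gdict {ν : Type} (init : String → ν) (upd : ν → String → ν) (dflt : ν)
    (l : List (String × String)) : PySem.Dict String ν :=
  l.foldl (fun d p =>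
    if d.contains p.2 then d.insert p.2 (upd ((d.get? p.2).getD dflt) p.1)
    else d.insert p.2 (init p.1)) PySem.Dict.empty

def gfold {ν : Type} (init : String → ν) (upd : ν → String → ν) (dflt : ν) : List String → ν
  | [] => dflt
  | c :: t => t.foldl upd (init c)

lemma find?_beq_self (k : String) (es : List String) (h : k ∈ es) :
    es.find? (fun e => e == k) = some k := by
  induction es with
  | nil => cases h
  | cons a t ih =>
    by_cases ha : a = k
    · subst ha; simp
    · have hb : (a == k) = false := by simp [ha]
      rcases List.mem_cons.1 h with h1 | h2
      · exact absurd h1.symm ha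
      · simp [List.find?, hb, ih h2]

lemma mem_emailsOf (l : List (String × String)) (e : String) :
    e ∈ emailsOf l ↔ e ∈ l.map Prod.snd := PySem.List.mem_dedup _ _

lemma emailsOf_append (l : List (String × String)) (p : String × String) :
    emailsOf (l ++ [p]) =
      if p.2 ∈ l.map Prod.snd then emailsOf l else emailsOf l ++ [p.2] := by
  have h1 : emailsOf (l ++ [p]) = PySem.Set.add (emailsOf l) p.2 := by
    simp [emailsOf, PySem.List.dedup, PySem.Set.ofList, List.foldl_append]
  rw [h1]
  simp only [PySem.Set.add, PySem.Set.contains, List.contains_iff_mem]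
  have h2 : (p.2 ∈ emailsOf l) ↔ p.2 ∈ l.map Prod.snd := mem_emailsOf l p.2
  by_cases hm : p.2 ∈ l.map Prod.snd <;> simp [hm, h2]

lemma cardsOf_append (l : List (String × String)) (p : String × String) (e : String) :
    cardsOf (l ++ [p]) e = cardsOf l e ++ (if p.2 = e then [p.1] else []) := by
  by_cases h : p.2 = e <;> simp [cardsOf, List.filter_append, h]

lemma cardsOf_ne_nil (l : List (String × String)) (e : String) (h : e ∈ l.map Prod.snd) :
    cardsOf l e ≠ [] := by
  obtain ⟨r, hr, hre⟩ := List.mem_map.1 h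
  have : r.1 ∈ cardsOf l e := by
    exact List.mem_map.2 ⟨r, List.mem_filter.2 ⟨hr, by simp [hre]⟩, rfl⟩
  exact List.ne_nil_of_mem this

lemma cardsOf_eq_nil (l : List (String × String)) (e : String) (h : e ∉ l.map Prod.snd) :
    cardsOf l e = [] := by
  simp only [cardsOf, List.map_eq_nil_iff, List.filter_eq_nil_iff]
  intro r hr
  simp only [bne_iff_ne, ne_eq, beq_iff_eq]
  intro hre; exact h (List.mem_map.2 ⟨r, hr, hre⟩)

lemma gfold_append {ν : Type} (init : String → ν) (upd : ν → String → ν) (dflt : ν)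
    (cs : List String) (c : String) (h : cs ≠ []) :
    gfold init upd dflt (cs ++ [c]) = upd (gfold init upd dflt cs) c := by
  cases cs with
  | nil => cases h rfl
  | cons c0 t => simp [gfold, List.foldl_append]

lemma gdict_items {ν : Type} (init : String → ν) (upd : ν → String → ν) (dflt : ν)
    (l : List (String × String)) :
    (gdict init upd dflt l).items
      = (emailsOf l).map (fun e => (e, gfold init upd dflt (cardsOf l e))) := by
  induction l using List.reverseRecOn with
  | nil => rfl
  | append_singleton l p ih =>
    have hstep : gdict init upd dflt (l ++ [p])
        = (if (gdict init upd dflt l).contains p.2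
           then (gdict init upd dflt l).insert p.2
                  (upd (((gdict init upd dflt l).get? p.2).getD dflt) p.1)
           else (gdict init upd dflt l).insert p.2 (init p.1)) := by
      simp [gdict, List.foldl_append]
    have hcont : (gdict init upd dflt l).contains p.2 = decide (p.2 ∈ l.map Prod.snd) := by
      simp only [PySem.Dict.contains, ih, List.any_map]
      by_cases hm : p.2 ∈ l.map Prod.snd
      · simp only [hm, decide_true]
        rw [List.any_eq_true]
        exact ⟨p.2, (mem_emailsOf l p.2).2 hm, by simp⟩
      · simp only [hm, decide_false]
        rw [List.any_eq_false]
        intro e he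
        have hne : e ≠ p.2 := fun hep => hm ((mem_emailsOf l p.2).1 (hep ▸ he))
        simp [hne]
    by_cases hm : p.2 ∈ l.map Prod.snd
    · -- existing email: value updated in place, key order unchanged
      have hget : (gdict init upd dflt l).get? p.2 = some (gfold init upd dflt (cardsOf l p.2)) := by
        simp only [PySem.Dict.get?, ih, List.find?_map]
        have : List.find? ((fun q => q.1 == p.2) ∘ fun e => (e, gfold init upd dflt (cardsOf l e)))
            (emailsOf l) = List.find? (fun e => e == p.2) (emailsOf l) := rfl
        rw [this, find?_beq_self p.2 _ ((mem_emailsOf l p.2).2 hm)]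
        rfl
      rw [hstep, hcont]
      simp only [hm, decide_true, if_true, hget, Option.getD_some]
      simp only [PySem.Dict.insert, hcont, hm, decide_true, if_true, ih, List.map_map]
      rw [emailsOf_append]
      simp only [hm, if_true]
      apply List.map_congr_left
      intro e he
      by_cases hep : e = p.2
      · subst hep
        simp only [Function.comp, beq_self_eq_true, if_true, cardsOf_append, if_pos rfl]
        rw [gfold_append _ _ _ _ _ (cardsOf_ne_nil l p.2 hm)]
      · have hb : (e == p.2) = false := by simp [hep]
        have hpe : p.2 ≠ e := fun hh => hep hh.symm
        simp [Function.comp, hb, cardsOf_append, hpe]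
    · -- new email: appended at the end
      rw [hstep, hcont]
      simp only [hm, decide_false, if_false]
      simp only [PySem.Dict.insert, hcont, hm, decide_false, Bool.false_eq_true, if_false, ih]
      rw [emailsOf_append]
      simp only [hm, if_false, List.map_append, List.map_cons, List.map_nil]
      congr 1
      · apply List.map_congr_left
        intro e he
        have hep : p.2 ≠ e := by
          intro h; exact hm (h ▸ (mem_emailsOf l e).1 he)
        simp [cardsOf_append, hep]
      · simp [cardsOf_append, cardsOf_eq_nil l p.2 hm, gfold]

-- the two ports' first loops, as gdict instances
lemma hacker_dict_eq (l : List (String × String)) :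
    l.foldl (fun d p =>
      if !(d.contains p.2) then d.insert p.2 p.1
      else d.insert p.2 (checkCardA ((d.get? p.2).getD "") p.1)) PySem.Dict.empty
    = gdict (fun c => c) (fun v c => checkCardA v c) "" l := by
  unfold gdict
  congr 1
  funext d p
  cases h : d.contains p.2 <;> simp [h]

-- column merge appends: the last card's non-'*' chars win
lemma mergedColumn_append (cards : List String) (c : String) (i : Int) :
    mergedColumn (cards ++ [c]) i
      = if (PySem.List.pyGetD c.toList i '*') != '*' then PySem.List.pyGetD c.toList i '*'
        else mergedColumn cards i := by
  simp [mergedColumn, List.foldl_append]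

lemma enumerate_eq (l : List Char) (s : Int) :
    PySem.List.enumerate l s = (List.range l.length).map (fun (k : Nat) => ((s + (k : Int), l.getD k '*') : Int × Char)) := by
  induction l generalizing s with
  | nil => simp [PySem.List.enumerate]
  | cons a t ih =>
    simp only [PySem.List.enumerate, ih, List.length_cons, List.range_succ_eq_map, List.map_cons,
      List.map_map]
    congr 1
    · simp
    · apply List.map_congr_left
      intro k _
      refine Prod.ext ?_ ?_
      · show s + 1 + (k : Int) = s + ((k + 1 : Nat) : Int)
        push_cast; ring
      · simp

-- checkCardA, rewritten: condition '(n=="*" and x) or (n!="*" and x)' is just x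
lemma checkCardA_toList (m c : String) :
    (checkCardA m c).toList
      = (PySem.List.enumerate m.toList).map
          (fun p => if (PySem.List.pyGetD c.toList p.1 '*') != '*'
                    then PySem.List.pyGetD c.toList p.1 '*' else p.2) := by
  unfold checkCardA
  rw [String.toList_ofList]
  have hfun : (fun (n : List Char) (p : Int × Char) =>
      if (n == ['*'] && (PySem.List.pyGetD c.toList p.1 '*') != '*')
         || (n != ['*'] && (PySem.List.pyGetD c.toList p.1 '*') != '*')
      then n ++ [PySem.List.pyGetD c.toList p.1 '*'] else n ++ [p.2])
      = (fun (n : List Char) (p : Int × Char) =>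
          n ++ [if (PySem.List.pyGetD c.toList p.1 '*') != '*'
                then PySem.List.pyGetD c.toList p.1 '*' else p.2]) := by
    funext n p
    cases hg : ((PySem.List.pyGetD c.toList p.1 '*') != '*') <;>
      cases hn : (n == ['*']) <;> simp [hg, hn, bne]
  rw [hfun, PySem.List.foldl_append_singleton_eq_map]
  simp

-- core: A's left fold of checkCardA equals B's column-wise merge
lemma merge_eq_columns (c0 : String) (rest : List String)
    (h : ∀ cc ∈ rest, c0.toList.length ≤ cc.toList.length) :
    (rest.foldl checkCardA c0).toList
      = (List.range c0.toList.length).map (fun (k : Nat) => mergedColumn (c0 :: rest) (k : Int)) := by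
  induction rest using List.reverseRecOn with
  | nil =>
    apply List.ext_getElem
    · simp
    · intro k h1 h2
      simp only [List.foldl_nil] at h1
      simp only [List.getElem_map, List.getElem_range, mergedColumn, List.foldl_cons, List.foldl_nil]
      rw [PySem.List.pyGetD_eq_getElem c0.toList '*' (Int.natCast_nonneg k) (by exact_mod_cast h1)]
      simp only [Int.toNat_natCast]
      cases hg : (c0.toList[k] != '*') <;> simp_all
  | append_singleton rest c ih =>
    have hlen : c0.toList.length ≤ c.toList.length := h c (by simp)
    have ih' := ih (fun cc hcc => h cc (by simp [hcc]))
    rw [List.foldl_append, List.foldl_cons, List.foldl_nil, checkCardA_toList, ih']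
    rw [enumerate_eq]
    simp only [List.length_map, List.length_range, List.map_map]
    apply List.map_congr_left
    intro k hk
    have hk' : k < c0.toList.length := List.mem_range.1 hk
    simp only [Function.comp, zero_add]
    have hcol : mergedColumn (c0 :: (rest ++ [c])) (k : Int)
        = if (PySem.List.pyGetD c.toList (k : Int) '*') != '*'
          then PySem.List.pyGetD c.toList (k : Int) '*'
          else mergedColumn (c0 :: rest) (k : Int) := by
      have : c0 :: (rest ++ [c]) = (c0 :: rest) ++ [c] := by simp
      rw [this, mergedColumn_append]
    rw [hcol]
    cases hg : ((PySem.List.pyGetD c.toList (k : Int) '*') != '*')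
    · simp only [hg, Bool.false_eq_true, if_false]
      rw [List.getD_eq_getElem _ '*' (by simpa using hk')]
      simp
    · simp [hg]

-- contaN counts the non-'*' characters
lemma contaN_eq_countP (m : String) :
    contaN m = ((m.toList.countP (fun ch => ch != '*') : Nat) : Int) := by
  unfold contaN
  rw [PySem.List.foldl_count_if (fun ch => ch != '*') m.toList 0]
  simp

-- a stable two-key insertion commutes with a key-preserving relabelling
lemma insertBy_map {α β : Type} (f : α → β) (b : α → α → Bool) (b' : β → β → Bool)
    (hb : ∀ x y, b' (f x) (f y) = b x y) (x : α) (acc : List α) :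
    PySem.List.insertBy b' (f x) (acc.map f) = (PySem.List.insertBy b x acc).map f := by
  induction acc with
  | nil => simp [PySem.List.insertBy]
  | cons a t ih =>
    simp only [List.map_cons, PySem.List.insertBy, hb]
    by_cases hx : b x a = true <;> simp [hx, ih]

lemma sorted2_map {α β κ₁ κ₂ : Type} [LT κ₁] [DecidableLT κ₁] [LT κ₂] [DecidableLT κ₂]
    (f : α → β) (k1 : α → κ₁) (k1' : β → κ₁) (k2 : α → κ₂) (k2' : β → κ₂)
    (h1 : ∀ a, k1' (f a) = k1 a) (h2 : ∀ a, k2' (f a) = k2 a) (xs : List α) :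
    PySem.List.sorted2 (xs.map f) k1' k2' = (PySem.List.sorted2 xs k1 k2).map f := by
  unfold PySem.List.sorted2
  simp only [if_neg (by simp : ¬ (false = true))]
  have hb : ∀ x y : α,
      (fun a b => decide (k1' a < k1' b) || !decide (k1' b < k1' a) && decide (k2' a < k2' b)) (f x) (f y)
      = (fun a b => decide (k1 a < k1 b) || !decide (k1 b < k1 a) && decide (k2 a < k2 b)) x y := by
    intro x y; simp [h1, h2]
  suffices hgen : ∀ (xs : List α) (acc : List α),
      List.foldl (fun acc x => PySem.List.insertBy
        (fun a b => decide (k1' a < k1' b) || !decide (k1' b < k1' a) && decide (k2' a < k2' b)) x acc)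
        (acc.map f) (xs.map f)
      = (List.foldl (fun acc x => PySem.List.insertBy
          (fun a b => decide (k1 a < k1 b) || !decide (k1 b < k1 a) && decide (k2 a < k2 b)) x acc)
          acc xs).map f by
    simpa using hgen xs []
  intro xs
  induction xs with
  | nil => intro acc; simp
  | cons x t ih =>
    intro acc
    simp only [List.map_cons, List.foldl_cons]
    rw [insertBy_map f _ _ hb x acc, ih]

-- Pre_ gives, for each email in the log, that its first card is no longer than any of its cards
lemma pre_head_le (log : List (String × String)) (hp : Pre_hacker log) (e : String)
    (he : e ∈ log.map Prod.snd) :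
    ∀ cc ∈ cardsOf log e, ((cardsOf log e).headD "").toList.length ≤ cc.toList.length := by
  intro cc hcc
  obtain ⟨r, hrf, hrc⟩ := List.mem_map.1 hcc
  have hre : r.2 = e := by
    have := (List.mem_filter.1 hrf).2
    simpa using this
  have hrl : r ∈ log := (List.mem_filter.1 hrf).1
  obtain ⟨q, hq⟩ : ∃ q, (log.filter (fun x => x.2 == e)).head? = some q := by
    cases hF : log.filter (fun x => x.2 == e) with
    | nil => exact absurd hF (by
        intro h
        have := List.filter_eq_nil_iff.1 h r hrl
        simp [hre] at this)
    | cons a t => exact ⟨a, by simp [hF]⟩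
  have hqh : (cardsOf log e).headD "" = q.1 := by
    simp only [cardsOf]
    cases hF : log.filter (fun x => x.2 == e) with
    | nil => rw [hF] at hq; cases hq
    | cons a t =>
      rw [hF] at hq
      simp at hq
      subst hq
      simp
  have hfe : (fun x : String × String => x.2 == r.2) = (fun x : String × String => x.2 == e) := by
    funext x; rw [hre]
  have hqmem : q ∈ log := (List.mem_filter.1 (List.mem_of_mem_head? hq)).1
  have hq' : (log.filter (fun x => x.2 == r.2)).head? = some q := by rw [hfe]; exact hq
  have := hp r hrl q hqmem hq'
  rw [hqh, ← hrc]
  exact this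

lemma hacker_eq (log : List (String × String)) :
    hacker log
      = (PySem.List.sorted2
          (((gdict (fun c => c) (fun v c => checkCardA v c) "" log).items).map
            (fun q => (q.1, (q.2, contaN q.2))))
          (fun x => -(x.2.2)) (fun x => x.1)).map (fun q => (q.2.1, q.1)) := by
  unfold hacker
  rw [hacker_dict_eq]

lemma hacker_alt_eq (log : List (String × String)) :
    hacker_alt log
      = (PySem.List.sorted2
          (((gdict (fun c => [c]) (fun v c => v ++ [c]) [] log).items).map
            (fun q =>
              let chars := (PySem.List.pyRange 0 ((q.2.headD "").toList.length : Int)).map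
                (fun i => mergedColumn q.2 i)
              (String.ofList chars, ((chars.countP (fun c => c != '*') : Nat) : Int), q.1)))
          (fun r => -(r.2.1)) (fun r => r.2.2)).map (fun r => (r.1, r.2.2)) := rfl

-- ===== VERDICT (by name: the statement is the Claim_ definition above) =====
theorem hacker_spec : Claim_equal_hacker := by
  intro log _ hpre
  unfold Spec_hacker
  rw [hacker_eq, hacker_alt_eq]
  rw [gdict_items, gdict_items]
  simp only [PySem.Dict.items, List.map_map]
  -- both sides are maps over (emailsOf log); identify the per-email rows, then commute the sort
  have key : ∀ e ∈ emailsOf log,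
      ((fun q : String × List String =>
        ((PySem.List.pyRange 0 ((q.2.headD "").toList.length : Int)).map (fun i => mergedColumn q.2 i)
          |> fun chars => (String.ofList chars, ((chars.countP (fun c => c != '*') : Nat) : Int), q.1)))
        ∘ fun e => (e, gfold (fun c => [c]) (fun v c => v ++ [c]) [] (cardsOf log e))) e
      = ((fun x : String × String × Int => (x.2.1, x.2.2, x.1))
          ∘ ((fun q : String × String => (q.1, (q.2, contaN q.2)))
          ∘ fun e => (e, gfold (fun c => c) (fun v c => checkCardA v c) "" (cardsOf log e)))) e := by
    intro e he
    have hmem : e ∈ log.map Prod.snd := (mem_emailsOf log e).1 he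
    obtain ⟨c0, rest, hcs⟩ : ∃ c0 rest, cardsOf log e = c0 :: rest := by
      cases h : cardsOf log e with
      | nil => exact absurd h (cardsOf_ne_nil log e hmem)
      | cons a t => exact ⟨a, t, rfl⟩
    have hlen := pre_head_le log hpre e hmem
    rw [hcs] at hlen
    simp only [List.headD_cons] at hlen
    have hlen' : ∀ cc ∈ rest, c0.toList.length ≤ cc.toList.length :=
      fun cc hcc => hlen cc (by simp [hcc])
    have hmerge := merge_eq_columns c0 rest hlen'
    have hgfoldA : gfold (fun c => c) (fun v c => checkCardA v c) "" (cardsOf log e)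
        = rest.foldl checkCardA c0 := by rw [hcs]; rfl
    have hgfoldB : gfold (fun c => [c]) (fun v c => v ++ [c]) [] (cardsOf log e)
        = c0 :: rest := by
      rw [hcs]
      show List.foldl (fun v c => v ++ [c]) [c0] rest = c0 :: rest
      have : ∀ (t : List String) (a : List String), List.foldl (fun v c => v ++ [c]) a t = a ++ t := by
        intro t
        induction t with
        | nil => intro a; simp
        | cons x s ih => intro a; simp [ih]
      simpa using this rest [c0]
    simp only [Function.comp, hgfoldA, hgfoldB, List.headD_cons]
    have hchars : (PySem.List.pyRange 0 ((c0.toList.length : Nat) : Int)).map (fun i => mergedColumn (c0 :: rest) i)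
        = (rest.foldl checkCardA c0).toList := by
      rw [PySem.List.pyRange_zero_natCast, List.map_map, hmerge]
      rfl
    rw [hchars]
    refine Prod.ext ?_ (Prod.ext ?_ rfl)
    · show String.ofList (rest.foldl checkCardA c0).toList = rest.foldl checkCardA c0
      exact String.ofList_toList
    · show (((rest.foldl checkCardA c0).toList.countP (fun c => c != '*') : Nat) : Int)
        = contaN (rest.foldl checkCardA c0)
      rw [contaN_eq_countP]
  rw [List.map_congr_left key]
  rw [← List.map_map (f := (fun (q : String × String) => (q.1, (q.2, contaN q.2)))
        ∘ fun e => (e, gfold (fun c => c) (fun v c => checkCardA v c) "" (cardsOf log e)))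
      (g := fun x : String × String × Int => (x.2.1, x.2.2, x.1))]
  rw [sorted2_map (fun x : String × String × Int => (x.2.1, x.2.2, x.1))
      (fun x => -(x.2.2)) (fun r => -(r.2.1)) (fun x => x.1) (fun r => r.2.2)
      (fun a => rfl) (fun a => rfl)]
  rw [List.map_map]
  rfl
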